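-- pv_equiv track=rewrite | github.com/pabloschwarzenberg/grader | tema4_ej3/tema4_ej3_2b33b843ab5b7d3d653a170b659672bd.py | jerigonzo
-- ===== SOURCE A (Python) =====
-- def jerigonzo(str):
--     lista=[]
--     finale = []
--     lista.extend(str)
--     xsumator=""
--     for rec in lista:
--         if rec == "a" or rec == "e" or rec == "i" or rec == "o" or rec == "u":
--             letra = rec
--             rec = rec + "p" + rec
--             finale.append(rec)
--         else:
--             finale.append(rec)
--     for i in range(0, len(finale)):
--         xsumator += finale[i]
--     return xsumator
-- ===== SOURCE B (Python) =====
-- def jerigonzo(s):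
--     # Five staged whole-string passes, one per vowel. Each vowel's expansion
--     # ("apa", "epe", ...) contains only 'p' and that same vowel, so later passes
--     # never touch text inserted by earlier ones.
--     return (s.replace("a", "apa")
--              .replace("e", "epe")
--              .replace("i", "ipi")
--              .replace("o", "opo")
--              .replace("u", "upu"))
-- ===== Notes on version B (the rewrite author's own statement) =====
-- stated objective: alternative
-- what changed: Replaces A's per-character branching loop plus a second index-driven concatenation loop with five staged whole-string str.replace passes, one per vowel; correctness relies on each vowel's expansion containing no other vowel, so later passes never rewrite earlier insertions.
import Mathlib
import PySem

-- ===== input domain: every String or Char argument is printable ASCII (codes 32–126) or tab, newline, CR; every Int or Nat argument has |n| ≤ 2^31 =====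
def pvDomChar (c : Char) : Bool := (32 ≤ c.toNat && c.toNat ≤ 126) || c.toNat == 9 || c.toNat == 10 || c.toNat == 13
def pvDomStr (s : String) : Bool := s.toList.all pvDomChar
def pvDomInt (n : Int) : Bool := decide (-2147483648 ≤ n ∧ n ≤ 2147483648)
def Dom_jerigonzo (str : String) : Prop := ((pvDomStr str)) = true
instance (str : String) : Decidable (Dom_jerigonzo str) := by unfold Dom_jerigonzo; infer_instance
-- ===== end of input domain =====

-- B replaces A's per-character branching loop + second concatenation loop with five
-- staged whole-string replace passes (one per vowel); equal return values on all strings.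

-- ===== PORT A =====
def jerigonzo (str : String) : String :=
  let lista : List Char := str.toList
  let finale : List String :=
    lista.foldl (fun acc rec =>
      if rec = 'a' ∨ rec = 'e' ∨ rec = 'i' ∨ rec = 'o' ∨ rec = 'u' then
        acc ++ [String.singleton rec ++ "p" ++ String.singleton rec]
      else
        acc ++ [String.singleton rec]) []
  (PySem.List.pyRange 0 (finale.length : Int) 1).foldl
    (fun xsumator i => xsumator ++ PySem.List.pyGetD finale i "") ""

-- ===== PORT B =====
def jerigonzo_alt (str : String) : String :=
  PySem.Str.replace
    (PySem.Str.replace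
      (PySem.Str.replace
        (PySem.Str.replace
          (PySem.Str.replace str "a" "apa")
          "e" "epe")
        "i" "ipi")
      "o" "opo")
    "u" "upu"

-- ===== PRECONDITION & SPEC =====
def Spec_jerigonzo (str : String) (out : String) : Prop := out = jerigonzo_alt str
instance (str : String) (out : String) : Decidable (Spec_jerigonzo str out) := by unfold Spec_jerigonzo; infer_instance

-- ===== CLAIM (what is proved, stated in full; the proofs are below) =====
def Claim_equal_jerigonzo : Prop := ∀ (str : String), Dom_jerigonzo str → Spec_jerigonzo str (jerigonzo str)

-- ===== LEMMAS AND PROOFS =====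

-- per-character expansion table: what one character contributes to the output
def jerigonzoTable (c : Char) : List Char :=
  if c = 'a' then ['a','p','a']
  else if c = 'e' then ['e','p','e']
  else if c = 'i' then ['i','p','i']
  else if c = 'o' then ['o','p','o']
  else if c = 'u' then ['u','p','u']
  else [c]

-- single-char substitution performed by one replace pass
def vrep (v : Char) (new : List Char) (c : Char) : List Char :=
  if c = v then new else [c]

-- replace.go with a single-char pattern is a flatMap of the per-char substitution
theorem replace_go_single (v : Char) (new : List Char) :
    ∀ (l : List Char) (fuel : Nat) (acc : List Char), l.length ≤ fuel →
      PySem.Chars.replace.go [v] new fuel l acc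
        = acc.reverse ++ l.flatMap (vrep v new) := by
  intro l
  induction l with
  | nil =>
    intro fuel acc _
    cases fuel <;> simp [PySem.Chars.replace.go]
  | cons c t ih =>
    intro fuel acc h
    cases fuel with
    | zero => simp at h
    | succ fuel =>
      by_cases hc : c = v
      · subst hc
        rw [PySem.Chars.replace.go]
        simp only [List.isPrefixOf, beq_self_eq_true, Bool.true_and,
          if_true, List.length_cons, List.length_nil,
          List.drop_succ_cons, List.drop_zero]
        rw [List.length_cons] at h
        rw [ih fuel (new.reverse ++ acc) (by omega)]
        simp [vrep]
      · rw [PySem.Chars.replace.go]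
        have : [v].isPrefixOf (c :: t) = false := by
          simp [List.isPrefixOf, Ne.symm hc]
        rw [this]
        simp only [Bool.false_eq_true, if_false]
        rw [List.length_cons] at h
        rw [ih fuel (c :: acc) (by omega)]
        simp [vrep, hc]

-- a whole replace pass with a single-char pattern
theorem replace_single (v : Char) (new l : List Char) :
    PySem.Chars.replace l [v] new = l.flatMap (vrep v new) := by
  rw [PySem.Chars.replace]
  simp only [List.isEmpty_cons, Bool.false_eq_true, if_false]
  rw [replace_go_single v new l l.length [] le_rfl]
  simp

-- composing the five per-char substitutions on one character gives the table entry
theorem five_passes_char (c : Char) :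
    ((vrep 'a' ['a','p','a'] c).flatMap fun x =>
      (vrep 'e' ['e','p','e'] x).flatMap fun y =>
        (vrep 'i' ['i','p','i'] y).flatMap fun z =>
          (vrep 'o' ['o','p','o'] z).flatMap (vrep 'u' ['u','p','u'])) = jerigonzoTable c := by
  by_cases h : c = 'a' ∨ c = 'e' ∨ c = 'i' ∨ c = 'o' ∨ c = 'u'
  · rcases h with h | h | h | h | h <;> subst h <;> simp [vrep, jerigonzoTable]
  · push_neg at h
    obtain ⟨ha, he, hi, ho, hu⟩ := h
    simp [vrep, jerigonzoTable, ha, he, hi, ho, hu]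

-- B computes the flatMap of the expansion table
theorem jerigonzo_alt_eq (str : String) :
    jerigonzo_alt str = String.ofList (str.toList.flatMap jerigonzoTable) := by
  unfold jerigonzo_alt
  simp only [PySem.Str.replace, String.toList_ofList]
  have ha : ("a" : String).toList = ['a'] := rfl
  have he : ("e" : String).toList = ['e'] := rfl
  have hi : ("i" : String).toList = ['i'] := rfl
  have ho : ("o" : String).toList = ['o'] := rfl
  have hu : ("u" : String).toList = ['u'] := rfl
  have hapa : ("apa" : String).toList = ['a','p','a'] := rfl
  have hepe : ("epe" : String).toList = ['e','p','e'] := rfl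
  have hipi : ("ipi" : String).toList = ['i','p','i'] := rfl
  have hopo : ("opo" : String).toList = ['o','p','o'] := rfl
  have hupu : ("upu" : String).toList = ['u','p','u'] := rfl
  rw [ha, he, hi, ho, hu, hapa, hepe, hipi, hopo, hupu,
    replace_single 'a', replace_single 'e', replace_single 'i',
    replace_single 'o', replace_single 'u']
  simp only [List.flatMap_assoc]
  simp only [five_passes_char]

-- A's per-character branch produces exactly the table entry, as a String
theorem jerigonzo_branch_eq_table (c : Char) :
    (if c = 'a' ∨ c = 'e' ∨ c = 'i' ∨ c = 'o' ∨ c = 'u' then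
      String.singleton c ++ "p" ++ String.singleton c
    else String.singleton c) = String.ofList (jerigonzoTable c) := by
  by_cases h : c = 'a' ∨ c = 'e' ∨ c = 'i' ∨ c = 'o' ∨ c = 'u'
  · rcases h with h | h | h | h | h <;> subst h <;> rw [if_pos (by simp)] <;> decide
  · rw [if_neg h]
    push_neg at h
    obtain ⟨ha, he, hi, ho, hu⟩ := h
    simp [jerigonzoTable, ha, he, hi, ho, hu, String.singleton_eq_ofList]

-- folding string concatenation over the mapped table entries builds the flatMap
theorem foldl_append_mk_table (l : List Char) (s : String) :
    (l.map (fun c => String.ofList (jerigonzoTable c))).foldl (· ++ ·) s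
      = s ++ String.ofList (l.flatMap jerigonzoTable) := by
  induction l generalizing s with
  | nil => simp [String.ofList_nil]
  | cons c t ih =>
    simp only [List.map_cons, List.foldl_cons, List.flatMap_cons, ih,
      String.ofList_append, String.append_assoc]

-- A computes the flatMap of the expansion table
theorem jerigonzo_eq (str : String) :
    jerigonzo str = String.ofList (str.toList.flatMap jerigonzoTable) := by
  unfold jerigonzo
  simp only []
  rw [PySem.List.foldl_pyRange_zero_pyGetD'
        (str.toList.foldl (fun acc rec =>
          if rec = 'a' ∨ rec = 'e' ∨ rec = 'i' ∨ rec = 'o' ∨ rec = 'u' then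
            acc ++ [String.singleton rec ++ "p" ++ String.singleton rec]
          else acc ++ [String.singleton rec]) []) "" (· ++ ·) ""]
  have hbody : (fun (acc : List String) (rec : Char) =>
      if rec = 'a' ∨ rec = 'e' ∨ rec = 'i' ∨ rec = 'o' ∨ rec = 'u' then
        acc ++ [String.singleton rec ++ "p" ++ String.singleton rec]
      else acc ++ [String.singleton rec])
      = (fun acc rec => acc ++ [String.ofList (jerigonzoTable rec)]) := by
    funext acc rec
    rw [← jerigonzo_branch_eq_table rec]
    split <;> rfl
  rw [hbody, PySem.List.foldl_append_singleton_eq_map, List.nil_append,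
      foldl_append_mk_table]
  simp

-- ===== VERDICT (by name: the statement is the Claim_ definition above) =====
theorem jerigonzo_spec : Claim_equal_jerigonzo := by
  intro str _
  unfold Spec_jerigonzo
  rw [jerigonzo_eq, jerigonzo_alt_eq]
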